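-- pv_equiv track=rewrite | github.com/LEC-AI/DevFleet | backend/sdk_engine.py | _parse_report_from_text
-- ===== SOURCE A (Python) =====
-- def _parse_report_from_text(output: str) -> dict | None:
--     """Backward-compatible: parse report from text markers."""
--     start_marker = "---DEVFLEET-REPORT-START---"
--     end_marker = "---DEVFLEET-REPORT-END---"
--
--     start_idx = output.find(start_marker)
--     end_idx = output.find(end_marker)
--     if start_idx == -1 or end_idx == -1:
--         return None
--
--     report_text = output[start_idx + len(start_marker):end_idx].strip()
--     sections = {}
--     current_section = None
--     current_content = []
--
--     for line in report_text.split("\n"):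
--         if line.startswith("## "):
--             if current_section:
--                 sections[current_section] = "\n".join(current_content).strip()
--             header = line[3:].strip().lower().replace("'", "").replace("\u2019", "")
--             current_section = header
--             current_content = []
--         else:
--             current_content.append(line)
--
--     if current_section:
--         sections[current_section] = "\n".join(current_content).strip()
--
--     return {
--         "files_changed": sections.get("files changed", ""),
--         "what_done": sections.get("whats done", ""),
--         "what_open": sections.get("whats open", ""),
--         "what_tested": sections.get("whats tested", ""),
--         "what_untested": sections.get("whats not tested", ""),
--         "next_steps": sections.get("next steps", ""),
--         "errors_encountered": sections.get("errors encountered", ""),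
--         "preview_url": sections.get("preview", ""),
--     }
-- ===== SOURCE B (Python) =====
-- def _parse_report_from_text(output: str) -> dict | None:
--     """Split-first re-implementation: locate header lines, group bodies by lookahead, build the dict once."""
--     start_marker = "---DEVFLEET-REPORT-START---"
--     end_marker = "---DEVFLEET-REPORT-END---"
--
--     start_idx = output.find(start_marker)
--     end_idx = output.find(end_marker)
--     if start_idx == -1 or end_idx == -1:
--         return None
--
--     report_text = output[start_idx + len(start_marker):end_idx].strip()
--     lines = report_text.split("\n")
--     n = len(lines)
--
--     pairs = []
--     i = 0
--     while i < n:
--         if not lines[i].startswith("## "):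
--             i += 1
--             continue
--         name = lines[i][3:].strip().lower().replace("'", "").replace("\u2019", "")
--         j = i + 1
--         while j < n and not lines[j].startswith("## "):
--             j += 1
--         if name:
--             pairs.append((name, "\n".join(lines[i + 1:j]).strip()))
--         i = j
--
--     sections = dict(pairs)
--     key_table = [
--         ("files_changed", "files changed"),
--         ("what_done", "whats done"),
--         ("what_open", "whats open"),
--         ("what_tested", "whats tested"),
--         ("what_untested", "whats not tested"),
--         ("next_steps", "next steps"),
--         ("errors_encountered", "errors encountered"),
--         ("preview_url", "preview"),
--     ]
--     return {out_key: sections.get(name, "") for out_key, name in key_table}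
-- ===== Notes on version B (the rewrite author's own statement) =====
-- stated objective: alternative
-- what changed: Replaces A's stateful accumulate-and-flush loop (current_section/current_content with a trailing final flush) by a lookahead grouping pass that collects (header, body) pairs directly, builds the sections dict once with dict(pairs), and assembles the result by mapping over a fixed key table.
import Mathlib
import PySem

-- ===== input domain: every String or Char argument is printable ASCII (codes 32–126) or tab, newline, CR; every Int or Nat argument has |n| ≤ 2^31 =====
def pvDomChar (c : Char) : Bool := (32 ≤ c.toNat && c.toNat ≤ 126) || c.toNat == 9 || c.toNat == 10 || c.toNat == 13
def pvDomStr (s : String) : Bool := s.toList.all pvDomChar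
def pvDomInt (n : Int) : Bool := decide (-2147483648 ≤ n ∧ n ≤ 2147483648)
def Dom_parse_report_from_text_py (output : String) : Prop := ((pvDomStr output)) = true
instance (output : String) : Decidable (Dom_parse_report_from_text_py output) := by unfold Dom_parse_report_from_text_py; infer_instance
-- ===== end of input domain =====

-- B replaces A's stateful accumulate-and-flush loop by a lookahead grouping of header/body blocks plus a
-- single dict(pairs) build and a key-table map; same return value everywhere (alternative decomposition, not faster).

-- ===== PORT A =====
-- header normalisation: line[3:].strip().lower().replace("'", "").replace("\u2019", "")  (identical inline expression in both Pythons)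
def pvNorm (line : String) : String :=
  PySem.Str.replace
    (PySem.Str.replace (PySem.Str.lower (PySem.Str.strip (PySem.Str.slice line (some 3) none))) "'" "")
    "\u2019" ""

-- `if current_section: sections[current_section] = "\n".join(current_content).strip()`
-- (current_section is None or a str; Python truthiness: fires iff it is a non-empty str)
def pvFlushA (d : PySem.Dict String String) (cur : Option String) (content : List String) :
    PySem.Dict String String :=
  match cur with
  | none => d
  | some s => if s = "" then d else d.insert s (PySem.Str.strip (PySem.Str.join "\n" content))

-- one iteration of A's `for line in report_text.split("\n")`
def pvStepA (st : PySem.Dict String String × Option String × List String) (line : String) :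
    PySem.Dict String String × Option String × List String :=
  if PySem.Str.startswith line "## " then
    (pvFlushA st.1 st.2.1 st.2.2, some (pvNorm line), [])
  else
    (st.1, st.2.1, st.2.2 ++ [line])

def parse_report_from_text_py (output : String) : Option (List (String × String)) :=
  let start_marker := "---DEVFLEET-REPORT-START---"
  let end_marker := "---DEVFLEET-REPORT-END---"
  let start_idx := PySem.Str.find output start_marker
  let end_idx := PySem.Str.find output end_marker
  if start_idx = -1 ∨ end_idx = -1 then none
  else
    let report_text := PySem.Str.strip
      (PySem.Str.slice output (some (start_idx + PySem.Str.len start_marker)) (some end_idx))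
    -- report_text.split("\n"): sep = "\n" ≠ "" so split? is always some; getD [] is unreachable
    let lines := (PySem.Str.split? report_text "\n").getD []
    let st := lines.foldl pvStepA (PySem.Dict.empty, none, [])
    let sections := pvFlushA st.1 st.2.1 st.2.2
    some
      [ ("files_changed", sections.getD "files changed" ""),
        ("what_done", sections.getD "whats done" ""),
        ("what_open", sections.getD "whats open" ""),
        ("what_tested", sections.getD "whats tested" ""),
        ("what_untested", sections.getD "whats not tested" ""),
        ("next_steps", sections.getD "next steps" ""),
        ("errors_encountered", sections.getD "errors encountered" ""),
        ("preview_url", sections.getD "preview" "") ]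

-- ===== PORT B =====
def pvIsHeader (line : String) : Bool := PySem.Str.startswith line "## "

-- B's index scan over `lines` (outer while on i, inner lookahead while on j) rendered as structural
-- recursion on the suffix lines[i:]: body = lines[i+1:j] is the lookahead-collected prefix of non-header
-- lines, the loop resumes at i = j, i.e. on the remaining suffix; exact.
def pvGroupsB : List String → List (String × String)
  | [] => []
  | l :: ls =>
    if pvIsHeader l then
      let name := pvNorm l
      let body := ls.takeWhile (fun x => !pvIsHeader x)
      let rest := ls.dropWhile (fun x => !pvIsHeader x)
      (if name = "" then [] else [(name, PySem.Str.strip (PySem.Str.join "\n" body))]) ++ pvGroupsB rest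
    else
      pvGroupsB ls
termination_by ls => ls.length
decreasing_by
  · exact Nat.lt_succ_of_le (List.length_dropWhile_le _ _)
  · exact Nat.lt_succ_self _

-- the fixed output-key / section-name table
def pvKeyTable : List (String × String) :=
  [ ("files_changed", "files changed"),
    ("what_done", "whats done"),
    ("what_open", "whats open"),
    ("what_tested", "whats tested"),
    ("what_untested", "whats not tested"),
    ("next_steps", "next steps"),
    ("errors_encountered", "errors encountered"),
    ("preview_url", "preview") ]

def parse_report_from_text_py_alt (output : String) : Option (List (String × String)) :=
  let start_marker := "---DEVFLEET-REPORT-START---"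
  let end_marker := "---DEVFLEET-REPORT-END---"
  let start_idx := PySem.Str.find output start_marker
  let end_idx := PySem.Str.find output end_marker
  if start_idx = -1 ∨ end_idx = -1 then none
  else
    let report_text := PySem.Str.strip
      (PySem.Str.slice output (some (start_idx + PySem.Str.len start_marker)) (some end_idx))
    let lines := (PySem.Str.split? report_text "\n").getD []
    let sections := PySem.Dict.ofList (pvGroupsB lines)
    some (pvKeyTable.map (fun p => (p.1, sections.getD p.2 "")))

-- ===== PRECONDITION & SPEC =====
def Spec_parse_report_from_text_py (output : String) (out : Option (List (String × String))) : Prop := out = parse_report_from_text_py_alt output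
instance (output : String) (out : Option (List (String × String))) : Decidable (Spec_parse_report_from_text_py output out) := by unfold Spec_parse_report_from_text_py; infer_instance

-- ===== CLAIM (what is proved, stated in full; the proofs are below) =====
def Claim_equal_parse_report_from_text_py : Prop := ∀ (output : String), Dom_parse_report_from_text_py output → Spec_parse_report_from_text_py output (parse_report_from_text_py output)

-- ===== LEMMAS AND PROOFS =====

-- unfolding equations for pvGroupsB at a header / non-header head
lemma pvGroupsB_cons_header (l : String) (ls : List String) (h : pvIsHeader l = true) :
    pvGroupsB (l :: ls)
    = (if pvNorm l = "" then []
       else [(pvNorm l, PySem.Str.strip (PySem.Str.join "\n" (ls.takeWhile (fun x => !pvIsHeader x))))])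
      ++ pvGroupsB (ls.dropWhile (fun x => !pvIsHeader x)) := by
  rw [pvGroupsB]; simp [h]

lemma pvGroupsB_cons_nonheader (l : String) (ls : List String) (h : pvIsHeader l = false) :
    pvGroupsB (l :: ls) = pvGroupsB ls := by
  rw [pvGroupsB]; simp [h]

-- skipping non-header lines does not change B's groups
lemma pvGroupsB_dropWhile (lines : List String) :
    pvGroupsB (lines.dropWhile (fun x => !pvIsHeader x)) = pvGroupsB lines := by
  induction lines with
  | nil => rfl
  | cons l ls ih =>
    by_cases h : pvIsHeader l
    · simp [List.dropWhile, h]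
    · simp [List.dropWhile, h, pvGroupsB_cons_nonheader l ls (by simpa using h), ih]

-- the core invariant: flushing the final state of A's loop equals folding B's groups into the
-- dict obtained by flushing the pending section extended with the leading non-header lines
lemma pvFlush_foldl (lines : List String) (d : PySem.Dict String String)
    (cur : Option String) (content : List String) :
    (fun st : PySem.Dict String String × Option String × List String =>
        pvFlushA st.1 st.2.1 st.2.2) (lines.foldl pvStepA (d, cur, content))
    = (pvGroupsB (lines.dropWhile (fun x => !pvIsHeader x))).foldl
        (fun d p => d.insert p.1 p.2)
        (pvFlushA d cur (content ++ lines.takeWhile (fun x => !pvIsHeader x))) := by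
  induction lines generalizing d cur content with
  | nil => simp [pvGroupsB]
  | cons l ls ih =>
    by_cases h : pvIsHeader l
    · have hstep : pvStepA (d, cur, content) l = (pvFlushA d cur content, some (pvNorm l), []) := by
        simp [pvStepA, pvIsHeader] at h ⊢; simp [h]
      rw [List.foldl_cons, hstep, ih]
      rw [List.takeWhile_cons, List.dropWhile_cons]
      simp only [h, Bool.not_true, Bool.false_eq_true, if_false, List.append_nil, List.nil_append]
      rw [pvGroupsB_cons_header l ls h, List.foldl_append]
      have hx : pvFlushA (pvFlushA d cur content) (some (pvNorm l))
            (List.takeWhile (fun x => !pvIsHeader x) ls)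
          = List.foldl (fun d p => d.insert p.1 p.2) (pvFlushA d cur content)
              (if pvNorm l = "" then []
               else [(pvNorm l,
                 PySem.Str.strip (PySem.Str.join "\n" (List.takeWhile (fun x => !pvIsHeader x) ls)))]) := by
        by_cases hn : pvNorm l = "" <;> simp [pvFlushA, hn]
      rw [hx]
    · have hstep : pvStepA (d, cur, content) l = (d, cur, content ++ [l]) := by
        simp [pvStepA, pvIsHeader] at h ⊢; simp [h]
      rw [List.foldl_cons, hstep, ih]
      rw [List.takeWhile_cons, List.dropWhile_cons]
      simp only [h, Bool.not_false, if_true]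
      simp

-- ===== VERDICT (by name: the statement is the Claim_ definition above) =====
theorem parse_report_from_text_py_spec : Claim_equal_parse_report_from_text_py := by
  have hsec : ∀ lines : List String,
      pvFlushA (lines.foldl pvStepA (PySem.Dict.empty, none, [])).1
        (lines.foldl pvStepA (PySem.Dict.empty, none, [])).2.1
        (lines.foldl pvStepA (PySem.Dict.empty, none, [])).2.2
      = PySem.Dict.ofList (pvGroupsB lines) := by
    intro lines
    have h := pvFlush_foldl lines PySem.Dict.empty none []
    rw [pvGroupsB_dropWhile] at h
    simpa [pvFlushA, PySem.Dict.ofList, PySem.Dict.update] using h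
  intro output _
  unfold Spec_parse_report_from_text_py parse_report_from_text_py parse_report_from_text_py_alt
  by_cases hm : PySem.Str.find output "---DEVFLEET-REPORT-START---" = -1 ∨
      PySem.Str.find output "---DEVFLEET-REPORT-END---" = -1
  · rw [if_pos hm, if_pos hm]
  · rw [if_neg hm, if_neg hm]
    simp only []
    rw [hsec _]
    simp [pvKeyTable]
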